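-- pv_equiv track=rewrite | github.com/shohoku11wrj/haoqiyou | update_webpage_events.py | _is_label_line
-- ===== SOURCE A (Python) =====
-- _LABEL_TERMINATORS = {
--     "route",
--     "summary",
--     "start",
--     "start/end",
--     "time",
--     "ride etiquette",
--     "ride leader",
--     "regroups/stops",
--     "pace",
--     "ride stats",
-- }
--
-- def _is_label_line(candidate: str) -> bool:
--     lowered_candidate = candidate.lower().strip()
--     bare_candidate = lowered_candidate.rstrip(":")
--     if bare_candidate in _LABEL_TERMINATORS:
--         return True
--     for label in _LABEL_TERMINATORS:
--         if lowered_candidate.startswith(f"{label}:"):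
--             return True
--     return False
-- ===== SOURCE B (Python) =====
-- _LABEL_TERMINATORS = {
--     "route",
--     "summary",
--     "start",
--     "start/end",
--     "time",
--     "ride etiquette",
--     "ride leader",
--     "regroups/stops",
--     "pace",
--     "ride stats",
-- }
--
-- def _is_label_line(candidate: str) -> bool:
--     # Single left-to-right character scan: accumulate the lowered key up to
--     # the first ':' (or the whole stripped line), then one membership test.
--     key_chars = []
--     for ch in candidate.strip():
--         if ch == ':':
--             break
--         key_chars.append(ch.lower())
--     return ''.join(key_chars) in _LABEL_TERMINATORS
-- ===== Notes on version B (the rewrite author's own statement) =====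
-- stated objective: alternative
-- what changed: A's rstrip-based bare-label test plus a startswith loop over all labels is replaced by one left-to-right character scan that accumulates the lowered prefix before the first colon, followed by a single membership test.
import Mathlib
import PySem

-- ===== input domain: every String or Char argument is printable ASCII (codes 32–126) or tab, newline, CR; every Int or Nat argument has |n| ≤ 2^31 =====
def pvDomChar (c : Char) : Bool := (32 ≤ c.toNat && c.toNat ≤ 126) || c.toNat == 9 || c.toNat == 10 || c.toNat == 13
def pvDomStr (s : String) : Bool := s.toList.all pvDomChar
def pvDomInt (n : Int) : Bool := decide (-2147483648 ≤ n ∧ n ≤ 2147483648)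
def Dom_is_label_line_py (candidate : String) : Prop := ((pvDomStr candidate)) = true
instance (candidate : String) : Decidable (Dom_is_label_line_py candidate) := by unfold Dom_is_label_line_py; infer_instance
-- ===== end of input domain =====

-- B replaces A's rstrip-based bare check plus startswith loop by one character scan
-- collecting the lowered prefix before the first colon, then a single membership test.
-- ===== PORT A =====
-- the set literal _LABEL_TERMINATORS (distinct elements; membership only, so order is irrelevant)
def pvLabels : List (List Char) :=
  ["route".toList, "summary".toList, "start".toList, "start/end".toList, "time".toList,
   "ride etiquette".toList, "ride leader".toList, "regroups/stops".toList, "pace".toList,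
   "ride stats".toList]

def is_label_line_py (candidate : String) : Bool :=
  -- lowered_candidate = candidate.lower().strip()
  let lowered := PySem.Chars.strip (PySem.Chars.lower candidate.toList)
  -- lowered_candidate.rstrip(":") ported by hand (PySem has no rstrip-with-chars):
  -- drop the trailing ':' characters — exact for a single-char strip set
  let bare := (lowered.reverse.dropWhile (· == ':')).reverse
  if pvLabels.contains bare then true
  else
    -- for label in _LABEL_TERMINATORS: if lowered_candidate.startswith(f"{label}:"): return True
    pvLabels.any (fun label => PySem.Chars.startswith lowered (label ++ [':']))

-- ===== PORT B =====
-- the for-loop of Source B: walk the stripped characters, stop at ':',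
-- cons the lowered character onto the key being built
def pvKeyGo : List Char → List Char
  | [] => []
  | c :: t => if c = ':' then [] else PySem.Chars.lowerChar c :: pvKeyGo t

def is_label_line_py_alt (candidate : String) : Bool :=
  -- ''.join(key_chars) in _LABEL_TERMINATORS
  pvLabels.contains (pvKeyGo (PySem.Chars.strip candidate.toList))

-- ===== PRECONDITION & SPEC =====
def Spec_is_label_line_py (candidate : String) (out : Bool) : Prop := out = is_label_line_py_alt candidate
instance (candidate : String) (out : Bool) : Decidable (Spec_is_label_line_py candidate out) := by unfold Spec_is_label_line_py; infer_instance

-- ===== CLAIM (what is proved, stated in full; the proofs are below) =====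
def Claim_equal_is_label_line_py : Prop := ∀ (candidate : String), Dom_is_label_line_py candidate → Spec_is_label_line_py candidate (is_label_line_py candidate)

-- ===== LEMMAS AND PROOFS =====

lemma pv_lowerChar_colon (c : Char) : PySem.Chars.lowerChar c = ':' → c = ':' := by
  unfold PySem.Chars.lowerChar PySem.Chars.isupper
  split_ifs with hu
  · intro h
    exfalso
    simp only [Bool.and_eq_true, decide_eq_true_eq, Char.le_def, UInt32.le_iff_toNat_le] at hu
    have hA : ('A' : Char).val.toNat = 65 := by decide
    have hZ : ('Z' : Char).val.toNat = 90 := by decide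
    have hge : 65 ≤ c.toNat := by unfold Char.toNat; omega
    have hle : c.toNat ≤ 90 := by unfold Char.toNat; omega
    have h2 := congrArg Char.toNat h
    rw [Char.toNat_ofNat, if_pos (by constructor; omega)] at h2
    have : (':' : Char).toNat = 58 := by decide
    omega
  · exact id

lemma pv_ne_colon_lower (c : Char) : (PySem.Chars.lowerChar c != ':') = (c != ':') := by
  by_cases h : c = ':'
  · subst h; decide
  · have h2 : PySem.Chars.lowerChar c ≠ ':' := fun hq => h (pv_lowerChar_colon c hq)
    rw [bne_iff_ne.mpr h2, bne_iff_ne.mpr h]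

-- Source B's scan computes the lowered prefix-before-first-colon of its input
lemma pv_keyGo_eq (l : List Char) :
    pvKeyGo l = (l.takeWhile (· != ':')).map PySem.Chars.lowerChar := by
  induction l with
  | nil => rfl
  | cons c t ih =>
    unfold pvKeyGo
    by_cases h : c = ':'
    · simp [h]
    · rw [if_neg h, List.takeWhile_cons, if_pos (by simpa using h), List.map_cons, ih]

lemma pv_takeWhile_append_all {p : Char → Bool} {L : List Char} (t : List Char)
    (h : ∀ a ∈ L, p a) : (L ++ t).takeWhile p = L ++ t.takeWhile p := by
  induction L with
  | nil => simp
  | cons a L ih =>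
    simp only [List.cons_append, List.takeWhile_cons, h a (by simp)]
    simp [ih (fun a ha => h a (by simp [ha]))]

lemma pv_key_of_prefix {L s : List Char} (hcf : ':' ∉ L) (hp : (L ++ [':']) <+: s) :
    s.takeWhile (· != ':') = L := by
  obtain ⟨t, rfl⟩ := hp
  rw [List.append_assoc, pv_takeWhile_append_all _ (fun a ha => by
    simp only [bne_iff_ne, ne_eq]; exact fun hq => hcf (hq ▸ ha))]
  simp

lemma pv_labels_colon_free : ∀ L ∈ pvLabels, ':' ∉ L := by decide

lemma pv_dropWhile_colon_eq_self (l : List Char) (h : ':' ∉ l) : l.dropWhile (· == ':') = l := by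
  cases l with
  | nil => simp
  | cons a t =>
    rw [List.dropWhile_cons, if_neg]
    simp only [beq_iff_eq]
    exact fun ha => h (ha ▸ List.mem_cons_self)

-- A's body equals one membership test on the prefix before the first colon
lemma pv_core (s : List Char) :
    (if pvLabels.contains ((s.reverse.dropWhile (· == ':')).reverse) then true
     else pvLabels.any (fun label => PySem.Chars.startswith s (label ++ [':']))) =
    pvLabels.contains (s.takeWhile (· != ':')) := by
  by_cases hk : s.takeWhile (· != ':') ∈ pvLabels
  · rw [(List.contains_iff_mem).mpr hk]
    have hkcf := pv_labels_colon_free _ hk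
    have hsplit := List.takeWhile_append_dropWhile (p := fun c => c != ':') (l := s)
    cases hd : s.dropWhile (· != ':') with
    | nil =>
      rw [hd, List.append_nil] at hsplit
      have hbare : (s.reverse.dropWhile (· == ':')).reverse = s := by
        rw [pv_dropWhile_colon_eq_self _ (by simpa using (hsplit ▸ hkcf : ':' ∉ s).imp fun h => h),
          List.reverse_reverse]
      rw [if_pos (by rw [hbare, List.contains_iff_mem]; exact hsplit ▸ hk)]
    | cons c t =>
      have hne : s.dropWhile (fun x => x != ':') ≠ [] := by rw [hd]; simp
      have h1 := List.head_dropWhile_not (p := fun x => x != ':') (l := s) hne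
      simp only [hd, List.head_cons] at h1
      have hc : c = ':' := by simpa using h1
      have hpre : PySem.Chars.startswith s (s.takeWhile (· != ':') ++ [':']) = true := by
        rw [PySem.Chars.startswith_iff]
        refine ⟨t, ?_⟩
        rw [List.append_assoc, List.singleton_append]
        subst hc
        rw [← hd]
        exact hsplit
      by_cases hb : pvLabels.contains ((s.reverse.dropWhile (· == ':')).reverse)
      · rw [if_pos hb]
      · rw [if_neg hb, List.any_eq_true]
        exact ⟨_, hk, hpre⟩
  · have hkc : pvLabels.contains (s.takeWhile (· != ':')) = false := by
      simpa [List.contains_iff_mem] using hk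
    rw [hkc]
    have hbare : pvLabels.contains ((s.reverse.dropWhile (· == ':')).reverse) = false := by
      simp only [Bool.eq_false_iff, ne_eq, List.contains_iff_mem]
      intro hb
      have hbcf := pv_labels_colon_free _ hb
      have hsplit : s = (s.reverse.dropWhile (· == ':')).reverse ++ (s.reverse.takeWhile (· == ':')).reverse := by
        conv_lhs => rw [← s.reverse_reverse,
          ← List.takeWhile_append_dropWhile (p := (· == ':')) (l := s.reverse)]
        rw [List.reverse_append]
      apply hk
      have hkeq : s.takeWhile (· != ':') = (s.reverse.dropWhile (· == ':')).reverse := by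
        conv_lhs => rw [hsplit]
        rw [pv_takeWhile_append_all _ (fun a ha => by
          simp only [bne_iff_ne, ne_eq]
          exact fun hq => hbcf (hq ▸ ha))]
        have : (s.reverse.takeWhile (· == ':')).reverse.takeWhile (· != ':') = [] := by
          cases hcs : (s.reverse.takeWhile (· == ':')).reverse with
          | nil => simp
          | cons a u =>
            have ha : a = ':' := by
              have : a ∈ (s.reverse.takeWhile (· == ':')).reverse := by rw [hcs]; simp
              rw [List.mem_reverse] at this
              simpa using List.mem_takeWhile_imp this
            simp [ha]
        simp [this]
      rw [hkeq]
      exact hb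
    rw [hbare, if_neg (by simp), List.any_eq_false]
    intro L hL
    rw [Bool.not_eq_true, Bool.eq_false_iff]
    intro hsw
    apply hk
    rw [pv_key_of_prefix (pv_labels_colon_free _ hL) ((PySem.Chars.startswith_iff _ _).mp hsw)]
    exact hL

-- printable non-space ASCII range: no space code lies in [33,126]
lemma pv_not_space (d : Char) (h1 : 33 ≤ d.toNat) (h2 : d.toNat ≤ 126) :
    PySem.Chars.isspace d = false := by
  unfold PySem.Chars.isspace
  simp only [Bool.or_eq_false_iff, Bool.and_eq_false_iff, decide_eq_false_iff_not]
  omega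

lemma pv_upper_bounds {c : Char} (hu : PySem.Chars.isupper c = true) :
    65 ≤ c.toNat ∧ c.toNat ≤ 90 := by
  unfold PySem.Chars.isupper at hu
  simp only [Bool.and_eq_true, decide_eq_true_eq, Char.le_def, UInt32.le_iff_toNat_le] at hu
  have hA : ('A' : Char).val.toNat = 65 := by decide
  have hZ : ('Z' : Char).val.toNat = 90 := by decide
  unfold Char.toNat
  omega

lemma pv_isspace_lower (c : Char) :
    PySem.Chars.isspace (PySem.Chars.lowerChar c) = PySem.Chars.isspace c := by
  unfold PySem.Chars.lowerChar
  split_ifs with hu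
  · obtain ⟨hge, hle⟩ := pv_upper_bounds hu
    have hvn : (Char.ofNat (c.toNat + 32)).toNat = c.toNat + 32 := by
      rw [Char.toNat_ofNat, if_pos (by constructor; omega)]
    rw [pv_not_space _ (by omega) (by omega), pv_not_space _ (by omega) (by omega)]
  · rfl

-- lower (a charwise map) commutes with strip, since lowering preserves space-ness
lemma pv_strip_lower (l : List Char) :
    PySem.Chars.strip (PySem.Chars.lower l) = (PySem.Chars.strip l).map PySem.Chars.lowerChar := by
  have hfe : (PySem.Chars.isspace ∘ PySem.Chars.lowerChar) = PySem.Chars.isspace :=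
    funext pv_isspace_lower
  show PySem.Chars.strip (l.map PySem.Chars.lowerChar) = _
  unfold PySem.Chars.strip PySem.Chars.rstrip PySem.Chars.lstrip
  rw [List.dropWhile_map, hfe, ← List.map_reverse, List.dropWhile_map, hfe, ← List.map_reverse]

-- taking the prefix before ':' commutes with lowering, since only ':' lowers to ':'
lemma pv_takeWhile_lower (m : List Char) :
    (m.map PySem.Chars.lowerChar).takeWhile (· != ':') =
      (m.takeWhile (· != ':')).map PySem.Chars.lowerChar := by
  rw [List.takeWhile_map]
  have hfe : ((fun c : Char => c != ':') ∘ PySem.Chars.lowerChar) = (fun c : Char => c != ':') :=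
    funext fun a => pv_ne_colon_lower a
  rw [hfe]

-- ===== VERDICT (by name: the statement is the Claim_ definition above) =====
theorem is_label_line_py_spec : Claim_equal_is_label_line_py := by
  intro candidate _
  unfold Spec_is_label_line_py is_label_line_py is_label_line_py_alt
  rw [pv_core, pv_strip_lower, pv_takeWhile_lower, pv_keyGo_eq]
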